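-- pv_equiv track=rewrite | github.com/maksfrol2/hybrid-steganoraphy-study | PSO/main.py | _bits_to_message
-- ===== SOURCE A (Python) =====
-- def _bits_to_message(bits):
--     """Convert a bit string back to a string message"""
--     # Ensure bits length is multiple of 8
--     if len(bits) % 8 != 0:
--         bits = bits.ljust((len(bits) // 8 + 1) * 8, '0')
--
--     message = ""
--     for i in range(0, len(bits), 8):
--         byte = bits[i:i+8]
--         message += chr(int(byte, 2))
--     return message
-- ===== SOURCE B (Python) =====
-- def _bits_to_message(bits):
--     """Convert a bit string back to a string message"""
--     if not bits:
--         return ""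
--     padded = bits + '0' * (-len(bits) % 8)
--     value = int(padded, 2)
--     return value.to_bytes(len(padded) // 8, 'big').decode('latin-1')
-- ===== Notes on version B (the rewrite author's own statement) =====
-- stated objective: faster
-- what changed: Replaces A's per-byte loop (slice 8 bits, int per chunk, chr, string concatenation) by one int over the whole padded string followed by a single big-endian to_bytes conversion decoded byte-per-char.
-- outside the precondition, e.g. on _bits_to_message('1111111111      '): A returns 'ÿ\x03', B returns '\x03ÿ'; on _bits_to_message('1              1'): A returns '\x01\x01', B raises ValueError; on _bits_to_message('1_000000'): A returns '@', B returns '@'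
import Mathlib
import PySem

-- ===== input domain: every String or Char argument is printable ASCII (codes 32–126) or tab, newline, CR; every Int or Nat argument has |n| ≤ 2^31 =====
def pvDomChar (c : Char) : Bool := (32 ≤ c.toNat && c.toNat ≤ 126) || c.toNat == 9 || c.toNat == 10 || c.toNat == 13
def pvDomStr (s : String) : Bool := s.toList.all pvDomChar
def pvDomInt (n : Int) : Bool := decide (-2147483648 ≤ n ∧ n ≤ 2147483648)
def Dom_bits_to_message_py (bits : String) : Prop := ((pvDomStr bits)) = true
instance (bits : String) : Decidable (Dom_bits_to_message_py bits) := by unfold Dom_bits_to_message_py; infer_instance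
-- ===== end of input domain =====

-- B converts the whole padded bit string to one integer and emits its big-endian bytes,
-- replacing A's per-byte parse-and-concatenate loop.


-- hand port of int(s, 2): exact on NONEMPTY strings of '0'/'1' characters, which is all
-- Pre_ lets either program feed it (PySem.Int.ofCharsBase?'s digit reader is private, so
-- the proofs use this transparent fold; shared by both ports, like int() in both Pythons)
def pvInt2 (cs : List Char) : Nat :=
  cs.foldl (fun a c => 2 * a + (if c = '1' then 1 else 0)) 0

-- ===== PORT A =====
-- the loop 'for i in range(0, len(bits), 8): message += chr(int(bits[i:i+8], 2))'
def pvA_go (cs : List Char) : String :=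
  String.ofList ((PySem.List.pyRange 0 (cs.length : Int) 8).foldl
    (fun msg i => msg ++ [Char.ofNat (pvInt2 (PySem.List.slice cs (some i) (some (i + 8))))]) [])

-- bits.ljust(w, '0') with w > len(bits) is bits ++ replicate (w - len) '0' (exact here:
-- the branch only runs when len % 8 ≠ 0, so w = (len//8 + 1)*8 > len)
def bits_to_message_py (bits : String) : String :=
  pvA_go (if bits.toList.length % 8 ≠ 0 then
            bits.toList ++ List.replicate ((bits.toList.length / 8 + 1) * 8 - bits.toList.length) '0'
          else bits.toList)

-- ===== PORT B =====
-- value.to_bytes(k, 'big').decode('latin-1'): the k big-endian base-256 digits as code points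
def pvToBytesBE (v : Nat) : Nat → List Char
  | 0 => []
  | k + 1 => pvToBytesBE (v / 256) k ++ [Char.ofNat (v % 256)]

def pvB_go (padded : List Char) : String :=
  String.ofList (pvToBytesBE (pvInt2 padded) (padded.length / 8))

-- 'if not bits: return ""', pad = (-len(bits)) % 8, then one bulk conversion
def bits_to_message_py_alt (bits : String) : String :=
  if bits.toList.isEmpty then ""
  else pvB_go (bits.toList ++ List.replicate (PySem.Int.mod (-(bits.toList.length : Int)) 8).toNat '0')

-- ===== PRECONDITION & SPEC =====
def pvIsWs (c : Char) : Bool := c == ' ' || c == '\t' || c == '\n' || c == '\r'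

-- Pre_ admits bit strings: at most 7 leading whitespace characters (which int(·, 2)
-- ignores like leading zeros) followed by '0'/'1' characters only; outside it int(·, 2)
-- raises ValueError in at least one of the two programs on almost every input, though
-- int's tolerance of underscores and per-chunk whitespace lets a few strings through
-- accidentally (see the cited examples).
def Pre_bits_to_message_py (bits : String) : Prop :=
  (bits.toList.dropWhile pvIsWs).all (fun c => c == '0' || c == '1') = true ∧
    (bits.toList.takeWhile pvIsWs).length ≤ 7
instance (bits : String) : Decidable (Pre_bits_to_message_py bits) := by
  unfold Pre_bits_to_message_py; infer_instance
def pvWitness_bits_to_message_py : String := "1011010"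

def Spec_bits_to_message_py (bits : String) (out : String) : Prop := out = bits_to_message_py_alt bits
instance (bits : String) (out : String) : Decidable (Spec_bits_to_message_py bits out) := by unfold Spec_bits_to_message_py; infer_instance

-- ===== CLAIM (what is proved, stated in full; the proofs are below) =====
def Claim_equal_bits_to_message_py : Prop := ∀ (bits : String), Dom_bits_to_message_py bits → Pre_bits_to_message_py bits → Spec_bits_to_message_py bits (bits_to_message_py bits)

-- ===== LEMMAS AND PROOFS =====

theorem pvInt2_shift (ys : List Char) (a : Nat) :
    ys.foldl (fun a c => 2 * a + (if c = '1' then 1 else 0)) a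
      = a * 2 ^ ys.length + pvInt2 ys := by
  induction ys generalizing a with
  | nil => simp [pvInt2]
  | cons c ys ih =>
    simp only [List.foldl_cons, List.length_cons, pvInt2] at *
    rw [ih, ih (2 * 0 + _)]
    ring

theorem pvInt2_append (xs ys : List Char) :
    pvInt2 (xs ++ ys) = pvInt2 xs * 2 ^ ys.length + pvInt2 ys := by
  unfold pvInt2
  rw [List.foldl_append, pvInt2_shift]; rfl

theorem pvInt2_lt (cs : List Char) : pvInt2 cs < 2 ^ cs.length := by
  induction cs with
  | nil => simp [pvInt2]
  | cons c cs ih =>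
    have := pvInt2_shift cs (2 * 0 + (if c = '1' then 1 else 0))
    simp only [pvInt2, List.foldl_cons, List.length_cons] at *
    rw [this]
    have : (if c = '1' then 1 else 0) ≤ 1 := by split <;> omega
    calc (2*0 + if c = '1' then 1 else 0) * 2 ^ cs.length + cs.foldl _ 0
        ≤ 2 ^ cs.length + cs.foldl (fun a c => 2 * a + (if c = '1' then 1 else 0)) 0 := by
          nlinarith [Nat.one_le_two_pow (n:=cs.length)]
      _ < 2 ^ (cs.length + 1) := by omega

-- the 8-character chunk map IS the big-endian byte expansion of the whole value
theorem pvChunks_eq_toBytes (k : Nat) (cs : List Char) (h : cs.length = 8 * k) :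
    (List.range k).map (fun j => Char.ofNat (pvInt2 ((cs.drop (8 * j)).take 8)))
      = pvToBytesBE (pvInt2 cs) k := by
  induction k generalizing cs with
  | zero => simp [pvToBytesBE]
  | succ k ih =>
    have hsplit : cs = cs.take (8 * k) ++ cs.drop (8 * k) := (List.take_append_drop _ _).symm
    have hlf : (cs.take (8 * k)).length = 8 * k := by rw [List.length_take, h]; omega
    have hld : (cs.drop (8 * k)).length = 8 := by rw [List.length_drop, h]; omega
    have hval : pvInt2 cs = pvInt2 (cs.take (8 * k)) * 256 + pvInt2 (cs.drop (8 * k)) := by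
      conv_lhs => rw [hsplit]
      rw [pvInt2_append, hld]; norm_num
    have hlt : pvInt2 (cs.drop (8 * k)) < 256 := by
      have := pvInt2_lt (cs.drop (8 * k)); rwa [hld] at this
    have hdiv : pvInt2 cs / 256 = pvInt2 (cs.take (8 * k)) := by rw [hval]; omega
    have hmod : pvInt2 cs % 256 = pvInt2 (cs.drop (8 * k)) := by rw [hval]; omega
    have htk : (cs.drop (8 * k)).take 8 = cs.drop (8 * k) :=
      List.take_of_length_le (by rw [hld])
    rw [List.range_succ, List.map_append]
    simp only [List.map_cons, List.map_nil, pvToBytesBE]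
    rw [hdiv, hmod, htk, ← ih (cs.take (8 * k)) hlf]
    congr 1
    apply List.map_congr_left
    intro j hj
    have hj' : j < k := List.mem_range.mp hj
    congr 1
    rw [List.drop_take, List.take_take]
    have hmin : min 8 (8 * k - 8 * j) = 8 := by omega
    rw [hmin]

-- A's fold over range(0, 8*k, 8) with 8-slices equals the byte expansion
theorem pvA_loop (k : Nat) (cs : List Char) (h : cs.length = 8 * k) :
    (PySem.List.pyRange 0 (cs.length : Int) 8).foldl
      (fun msg i => msg ++ [Char.ofNat (pvInt2 (PySem.List.slice cs (some i) (some (i + 8))))]) []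
      = pvToBytesBE (pvInt2 cs) k := by
  rw [PySem.List.foldl_append_singleton_eq_map, List.nil_append]
  rw [h, PySem.List.pyRange_of_pos _ _ (by norm_num)]
  have hcount : (if (0:Int) < ((8 * k : Nat) : Int)
      then ((((8 * k : Nat) : Int) - 0 + 8 - 1) / 8).toNat else 0) = k := by
    split
    · push_cast
      omega
    · omega
  rw [hcount, List.map_map]
  rw [← pvChunks_eq_toBytes k cs h]
  apply List.map_congr_left
  intro j hj
  simp only [Function.comp_apply, zero_add]
  congr 1
  have h8 : (8 : Int) * (j : Nat) = ((8 * j : Nat) : Int) := by push_cast; ring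
  rw [h8]
  have h8' : ((8 * j : Nat) : Int) + 8 = ((8 * j : Nat) : Int) + ((8 : Nat) : Int) := by norm_num
  rw [h8', PySem.List.slice_natCast_add]

-- on any list of length a multiple of 8 the two post-padding pipelines agree
theorem pv_go_eq (cs : List Char) (h : cs.length % 8 = 0) : pvA_go cs = pvB_go cs := by
  obtain ⟨k, hk⟩ : ∃ k, cs.length = 8 * k := ⟨cs.length / 8, by omega⟩
  unfold pvA_go pvB_go
  rw [pvA_loop k cs hk, hk]
  congr 2
  omega

-- ===== VERDICT (by name: the statement is the Claim_ definition above) =====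
theorem bits_to_message_py_spec : Claim_equal_bits_to_message_py := by
  intro bits _ _
  unfold Spec_bits_to_message_py bits_to_message_py bits_to_message_py_alt
  by_cases hmod : bits.toList.length % 8 = 0
  · -- A does not pad; B's pad is 0
    have hpad : (PySem.Int.mod (-(bits.toList.length : Int)) 8).toNat = 0 := by
      rw [PySem.Int.mod_eq_emod_of_pos (by norm_num)]
      omega
    by_cases hnil : bits.toList.isEmpty
    · rw [if_neg (by omega), if_pos hnil]
      rw [List.isEmpty_iff.mp hnil]
      rfl
    · rw [if_neg (by omega), if_neg hnil, hpad]
      simp only [List.replicate_zero, List.append_nil]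
      exact pv_go_eq _ hmod
  · -- A pads with ljust, B with (-len) % 8 zeros: the same list
    have hne : ¬ bits.toList.isEmpty := by
      rw [List.isEmpty_iff]
      intro hcon
      rw [hcon] at hmod
      simp at hmod
    rw [if_pos hmod, if_neg hne]
    have hpad : (PySem.Int.mod (-(bits.toList.length : Int)) 8).toNat
        = (bits.toList.length / 8 + 1) * 8 - bits.toList.length := by
      rw [PySem.Int.mod_eq_emod_of_pos (by norm_num)]
      omega
    rw [hpad]
    apply pv_go_eq
    rw [List.length_append, List.length_replicate]
    omega
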